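-- pv_equiv track=rewrite | github.com/TitoBarrosTI/fast-tools-for-dev | utils/text_utils.py | seekText
-- ===== SOURCE A (Python) =====
-- def seekText(pattern, data:str ):
--     if not isinstance(pattern, str) or not pattern or not isinstance(data, str) or not str:
--         return []
--
--     results = []
--     ocurrence = 0
--     MAX_SHOW = 10
--
--     for num_line, line in enumerate(data.splitlines(), start=1):
--         begin = 0
--         while True:
--             pos = line.find(pattern, begin)
--             if pos == -1:
--                 break
--
--             ocurrence +=1
--
--             if ocurrence <= MAX_SHOW:
--                 if ocurrence == 1:
--                     results.append(
--                         f'Founded:\n\non the line {num_line}, collumn {pos}: {line}'.strip())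
--                 else:
--                     results.append(f'on the line {num_line}, collumn {pos}: {line}'.strip())
--
--             begin = pos + len(pattern)
--
--     if ocurrence > MAX_SHOW:
--         results.append(f'\n\n there may be more {(ocurrence-10)} ocurrences')
--
--     return results
-- ===== SOURCE B (Python) =====
-- def seekText(pattern, data: str):
--     if not isinstance(pattern, str) or not pattern or not isinstance(data, str):
--         return []
--
--     # Split-based algorithm: no searching primitive at all. line.split(pattern)
--     # cuts the line at every non-overlapping occurrence, so each piece before the
--     # last marks one occurrence, whose column is the running length of everything
--     # emitted so far.
--     results = []
--     total = 0
--     for num_line, line in enumerate(data.splitlines(), start=1):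
--         col = 0
--         for piece in line.split(pattern)[:-1]:
--             col += len(piece)
--             total += 1
--             if total <= 10:
--                 head = 'Founded:\n\n' if total == 1 else ''
--                 results.append(f'{head}on the line {num_line}, collumn {col}: {line}'.strip())
--             col += len(pattern)
--
--     if total > 10:
--         results.append(f'\n\n there may be more {total - 10} ocurrences')
--     return results
-- ===== Notes on version B (the rewrite author's own statement) =====
-- stated objective: alternative
-- what changed: A repeatedly calls str.find with a moving start index and a global occurrence counter; B never searches at all: it cuts each line with line.split(pattern) and derives every occurrence's column as the running sum of the lengths of the pieces and separators emitted so far.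
import Mathlib
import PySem

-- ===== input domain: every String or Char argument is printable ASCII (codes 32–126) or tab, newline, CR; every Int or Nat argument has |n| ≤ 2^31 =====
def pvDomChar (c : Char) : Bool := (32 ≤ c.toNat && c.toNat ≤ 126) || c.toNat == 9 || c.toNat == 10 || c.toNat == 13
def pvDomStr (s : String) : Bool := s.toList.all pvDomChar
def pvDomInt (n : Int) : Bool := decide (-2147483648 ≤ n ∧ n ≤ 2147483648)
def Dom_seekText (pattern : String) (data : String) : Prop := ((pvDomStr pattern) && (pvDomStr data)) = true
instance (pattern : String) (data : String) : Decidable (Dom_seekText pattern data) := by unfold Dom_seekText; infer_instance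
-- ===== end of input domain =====

-- B replaces A's repeated str.find scan by split(pattern) with columns from cumulative piece lengths; return values proved equal, objective: alternative.

-- ===== PORT A =====
-- shared formatting helpers: both Pythons build the very same f-strings
def fmtMatch (first : Bool) (n pos : Int) (line : List Char) : String :=
  String.ofList (PySem.Chars.strip
    ((if first then "Founded:\n\non the line " else "on the line ").toList ++
      PySem.Int.toChars n ++ ", collumn ".toList ++ PySem.Int.toChars pos ++ ": ".toList ++ line))

def moreMsg (k : Int) : String :=
  String.ofList ("\n\n there may be more ".toList ++ PySem.Int.toChars k ++ " ocurrences".toList)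

-- A's inner 'while True' find-loop; fuel (line.length + 1 at entry) only makes the recursion total
def lineLoopA (pat line : List Char) (numLine : Int) : Nat → Nat → Nat → List String → Nat × List String
  | 0, _, occ, res => (occ, res)
  | fuel + 1, b, occ, res =>
    let pos := PySem.Chars.findFrom line pat (b : Int)
    if pos = -1 then (occ, res)
    else
      let occ' := occ + 1
      let res' := if occ' ≤ 10 then res ++ [fmtMatch (occ' == 1) numLine pos line] else res
      lineLoopA pat line numLine fuel (pos.toNat + pat.length) occ' res'

def seekText (pattern : String) (data : String) : List String :=
  if pattern.toList = [] then []
  else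
    let s := (PySem.List.enumerate (PySem.Chars.splitlines data.toList) 1).foldl
      (fun s nl => lineLoopA pattern.toList nl.2 nl.1 (nl.2.length + 1) 0 s.1 s.2) (0, [])
    if s.1 > 10 then s.2 ++ [moreMsg ((s.1 : Int) - 10)] else s.2

-- ===== PORT B =====
-- per line: the pieces of line.split(pattern) except the last each mark one occurrence,
-- at the column reached by summing the lengths of the pieces and separators already passed
def seekText_alt (pattern : String) (data : String) : List String :=
  match pattern.toList with
  | [] => []
  | p :: ps =>
    let pat := p :: ps
    let s := (PySem.List.enumerate (PySem.Chars.splitlines data.toList) 1).foldl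
      (fun (s : Nat × List String) nl =>
        ((PySem.Chars.splitOn nl.2 pat).dropLast.foldl
          (fun (t : Nat × Nat × List String) piece =>
            let col := t.1 + piece.length
            let total := t.2.1 + 1
            (col + pat.length, total,
              if total ≤ 10 then
                t.2.2 ++ [fmtMatch (total == 1) nl.1 (col : Int) nl.2]
              else t.2.2))
          (0, s.1, s.2)).2) (0, [])
    if s.1 > 10 then s.2 ++ [moreMsg ((s.1 : Int) - 10)] else s.2

-- ===== PRECONDITION & SPEC =====
def Spec_seekText (pattern : String) (data : String) (out : List String) : Prop := out = seekText_alt pattern data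
instance (pattern : String) (data : String) (out : List String) : Decidable (Spec_seekText pattern data out) := by unfold Spec_seekText; infer_instance

-- ===== CLAIM (what is proved, stated in full; the proofs are below) =====
def Claim_equal_seekText : Prop := ∀ (pattern : String) (data : String), Dom_seekText pattern data → Spec_seekText pattern data (seekText pattern data)

-- ===== LEMMAS AND PROOFS =====

-- proof-side bridge: the list of match start positions, scanned left to right with a jump past each match
def scanB (p : Char) (ps : List Char) (suffix : List Char) (i : Nat) : List Nat :=
  if ps.length + 1 ≤ suffix.length then
    if (p :: ps).isPrefixOf suffix then
      i :: scanB p ps (suffix.drop (ps.length + 1)) (i + (ps.length + 1))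
    else scanB p ps suffix.tail (i + 1)
  else []
termination_by suffix.length
decreasing_by
  · simp; omega
  · have h1 : suffix.tail.length = suffix.length - 1 := by simp
    omega

-- one step of the shared "count the match, format the first ten" state machine
def stepA (s : Nat × List String) (m : Int × Int × List Char) : Nat × List String :=
  (s.1 + 1, if s.1 + 1 ≤ 10 then s.2 ++ [fmtMatch (s.1 + 1 == 1) m.1 m.2.1 m.2.2] else s.2)

theorem scanB_nil (p : Char) (ps suffix : List Char) (i : Nat)
    (h : ¬ (p :: ps) <:+: suffix) : scanB p ps suffix i = [] := by
  fun_induction scanB p ps suffix i with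
  | case1 suffix i hlen hpre ih =>
      exact absurd (List.isPrefixOf_iff_prefix.mp hpre).isInfix h
  | case2 suffix i hlen hpre ih =>
      exact ih (fun hinf => h (hinf.trans (List.tail_suffix suffix).isInfix))
  | case3 => rfl

theorem scanB_skip (p : Char) (ps line : List Char) (k : Nat)
    (hk : (p :: ps) <+: line.drop k) :
    ∀ b, b ≤ k → (∀ i, b ≤ i → i < k → ¬ (p :: ps) <+: line.drop i) →
      scanB p ps (line.drop b) b
        = k :: scanB p ps (line.drop (k + (ps.length + 1))) (k + (ps.length + 1)) := by
  have hlenk : ps.length + 1 ≤ line.length - k := by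
    have := hk.length_le
    simp at this ⊢
    omega
  intro b hbk
  induction hd : k - b generalizing b with
  | zero =>
      intro _
      have hb : b = k := by omega
      subst hb
      rw [scanB]
      rw [if_pos (by simp; omega), if_pos (List.isPrefixOf_iff_prefix.mpr hk)]
      rw [List.drop_drop, Nat.add_comm]
  | succ d ih =>
      intro hmin
      have hblt : b < k := by omega
      rw [scanB]
      rw [if_pos (by simp; omega), if_neg ?hp]
      case hp =>
        intro hpre
        exact hmin b le_rfl hblt (List.isPrefixOf_iff_prefix.mp hpre)
      rw [List.tail_drop]
      exact ih (b + 1) (by omega) (by omega) (fun i h1 h2 => hmin i (by omega) h2)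

theorem lineA (p : Char) (ps line : List Char) (numLine : Int) :
    ∀ (fuel b : Nat) (occ : Nat) (res : List String), b ≤ line.length →
      line.length + 1 - b ≤ fuel →
      lineLoopA (p :: ps) line numLine fuel b occ res
        = ((scanB p ps (line.drop b) b).map
            (fun pos => ((numLine, (Int.ofNat pos, line)) : Int × Int × List Char))).foldl stepA (occ, res) := by
  intro fuel
  induction fuel with
  | zero => intro b occ res hb hf; omega
  | succ fuel ih =>
      intro b occ res hb hf
      rw [lineLoopA]
      by_cases hpos : PySem.Chars.findFrom line (p :: ps) (b : Int) = -1
      · rw [scanB_nil p ps _ b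
          (((PySem.Chars.findFrom_natCast_eq_neg_one_iff line (p :: ps) b hb).mp hpos))]
        simp [hpos]
      · obtain ⟨hle, hpre, hmin⟩ := PySem.Chars.findFrom_natCast_spec line (p :: ps) b hb hpos
        set pos := PySem.Chars.findFrom line (p :: ps) (b : Int) with hposdef
        have hpos0 : (0 : Int) ≤ pos := le_trans (by positivity) hle
        have hcast : pos = ((pos.toNat : Nat) : Int) := (Int.toNat_of_nonneg hpos0).symm
        have hbk : b ≤ pos.toNat := by omega
        have hkL : pos.toNat + (ps.length + 1) ≤ line.length := by
          have := hpre.length_le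
          simp at this
          omega
        rw [scanB_skip p ps line pos.toNat hpre b hbk
          (fun i h1 h2 => hmin i h1 h2)]
        simp only [List.map_cons, List.foldl_cons, if_neg hpos]
        rw [ih (pos.toNat + (p :: ps).length) (occ + 1) _ (by simp; omega) (by simp; omega)]
        simp only [List.length_cons, stepA]
        rw [hcast]
        simp

-- ===== splitOn characterisation =====

-- append a prefix to the first piece (helper to state the go invariant)
def firstApp (pre : List Char) : List (List Char) → List (List Char)
  | [] => [pre]
  | a :: t => (pre ++ a) :: t

theorem firstApp_firstApp (pre : List Char) (c : Char) (xs : List (List Char)) :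
    firstApp pre (firstApp [c] xs) = firstApp (pre ++ [c]) xs := by
  cases xs <;> simp [firstApp]

theorem splitOn_go_ne_nil (sep : List Char) :
    ∀ (fuel : Nat) (l cur : List Char) (acc : List (List Char)),
      PySem.Chars.splitOn.go sep fuel l cur acc ≠ [] := by
  intro fuel
  induction fuel with
  | zero => intro l cur acc; rw [PySem.Chars.splitOn.go]; simp
  | succ fuel ih =>
      intro l cur acc
      cases l with
      | nil => rw [PySem.Chars.splitOn.go]; simp; omega
      | cons c rest =>
          rw [PySem.Chars.splitOn.go]
          by_cases hp : sep.isPrefixOf (c :: rest) = true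
          · rw [if_pos hp]; exact ih _ _ _
          · rw [if_neg hp]; exact ih _ _ _

theorem splitOn_ne_nil (l sep : List Char) : PySem.Chars.splitOn l sep ≠ [] := by
  rw [PySem.Chars.splitOn]; exact splitOn_go_ne_nil sep _ l [] []

theorem splitOn_go_spec (sep : List Char) (hsep : sep ≠ []) :
    ∀ (fuel : Nat) (l cur : List Char) (acc : List (List Char)), l.length < fuel →
      PySem.Chars.splitOn.go sep fuel l cur acc
        = acc.reverse ++ firstApp cur.reverse (PySem.Chars.splitOn l sep) := by
  intro fuel
  induction fuel using Nat.strong_induction_on with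
  | _ fuel ih =>
      intro l cur acc h
      cases fuel with
      | zero => omega
      | succ f =>
          cases l with
          | nil =>
              simp [PySem.Chars.splitOn.go, PySem.Chars.splitOn, firstApp]
          | cons c rest =>
              rw [PySem.Chars.splitOn.go]
              by_cases hp : sep.isPrefixOf (c :: rest) = true
              · rw [if_pos hp]
                have hsl : 1 ≤ sep.length := by cases sep <;> simp_all
                have hdl : ((c :: rest).drop sep.length).length < f := by
                  simp at h ⊢; omega
                rw [ih f (by omega) _ _ _ hdl]
                conv_rhs => rw [PySem.Chars.splitOn]
                rw [PySem.Chars.splitOn.go, if_pos hp]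
                rw [ih (c :: rest).length (by omega) _ _ _ (by simp; omega)]
                cases hx : PySem.Chars.splitOn ((c :: rest).drop sep.length) sep with
                | nil => exact absurd hx (splitOn_ne_nil _ _)
                | cons a t => simp [firstApp]
              · rw [if_neg hp]
                have hrl : rest.length < f := by simp at h; omega
                rw [ih f (by omega) _ _ _ hrl]
                conv_rhs => rw [PySem.Chars.splitOn]
                rw [PySem.Chars.splitOn.go, if_neg hp]
                rw [ih (c :: rest).length (by omega) _ _ _ (by simp)]
                simp only [List.reverse_cons, List.reverse_nil, List.nil_append]
                rw [firstApp_firstApp]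

theorem splitOn_nil (sep : List Char) : PySem.Chars.splitOn [] sep = [[]] := by
  simp [PySem.Chars.splitOn, PySem.Chars.splitOn.go]

theorem splitOn_cons_pos (sep : List Char) (hsep : sep ≠ []) (c : Char) (rest : List Char)
    (hp : sep.isPrefixOf (c :: rest) = true) :
    PySem.Chars.splitOn (c :: rest) sep
      = [] :: PySem.Chars.splitOn ((c :: rest).drop sep.length) sep := by
  conv_lhs => rw [PySem.Chars.splitOn]
  rw [PySem.Chars.splitOn.go, if_pos hp]
  have hsl : 1 ≤ sep.length := by cases sep <;> simp_all
  rw [splitOn_go_spec sep hsep _ _ _ _ (by simp; omega)]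
  cases hx : PySem.Chars.splitOn ((c :: rest).drop sep.length) sep with
  | nil => exact absurd hx (splitOn_ne_nil _ _)
  | cons a t => simp [firstApp]

theorem splitOn_cons_neg (sep : List Char) (hsep : sep ≠ []) (c : Char) (rest : List Char)
    (hp : ¬ sep.isPrefixOf (c :: rest) = true) :
    PySem.Chars.splitOn (c :: rest) sep = firstApp [c] (PySem.Chars.splitOn rest sep) := by
  conv_lhs => rw [PySem.Chars.splitOn]
  rw [PySem.Chars.splitOn.go, if_neg hp]
  rw [splitOn_go_spec sep hsep _ _ _ _ (by simp)]
  simp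

theorem splitOn_no_match (sep : List Char) (hsep : sep ≠ []) :
    ∀ (l : List Char), ¬ sep <:+: l → PySem.Chars.splitOn l sep = [l] := by
  intro l
  induction l with
  | nil => intro _; exact splitOn_nil sep
  | cons c rest ih =>
      intro h
      have hp : ¬ sep.isPrefixOf (c :: rest) = true := by
        intro hp
        exact h (List.isPrefixOf_iff_prefix.mp hp).isInfix
      rw [splitOn_cons_neg sep hsep c rest hp]
      rw [ih (fun hinf => h (hinf.trans (List.suffix_cons c rest).isInfix))]
      simp [firstApp]

-- the match positions read off the split pieces: running sum of piece and separator lengths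
def posOf (L : Nat) : List (List Char) → Nat → List Nat
  | [], _ => []
  | [_], _ => []
  | a :: b :: t, i => (i + a.length) :: posOf L (b :: t) (i + a.length + L)

theorem posOf_firstApp (L : Nat) (c : Char) (xs : List (List Char)) (i : Nat) :
    posOf L (firstApp [c] xs) i = posOf L xs (i + 1) := by
  match xs with
  | [] => simp [firstApp, posOf]
  | [a] => simp [firstApp, posOf]
  | a :: b :: t =>
      have h1 : i + ([c] ++ a).length = i + 1 + a.length := by simp; omega
      simp only [firstApp, posOf]
      rw [h1]

theorem scanB_eq_posOf (p : Char) (ps : List Char) :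
    ∀ (suffix : List Char) (i : Nat),
      scanB p ps suffix i = posOf (ps.length + 1) (PySem.Chars.splitOn suffix (p :: ps)) i := by
  intro suffix i
  fun_induction scanB p ps suffix i with
  | case1 suffix i hlen hpre ih =>
      cases suffix with
      | nil => simp at hlen
      | cons c rest =>
          rw [splitOn_cons_pos (p :: ps) (by simp) c rest hpre]
          simp only [List.length_cons]
          cases hx : PySem.Chars.splitOn ((c :: rest).drop (ps.length + 1)) (p :: ps) with
          | nil => exact absurd hx (splitOn_ne_nil _ _)
          | cons a t =>
              rw [hx] at ih
              simp only [posOf, List.length_nil, Nat.add_zero]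
              rw [ih]
  | case2 suffix i hlen hpre ih =>
      cases suffix with
      | nil => simp at hlen
      | cons c rest =>
          rw [splitOn_cons_neg (p :: ps) (by simp) c rest hpre]
          rw [posOf_firstApp]
          simpa using ih
  | case3 suffix i hlen =>
      have hni : ¬ (p :: ps) <:+: suffix := by
        intro hinf
        have := hinf.length_le
        simp at this hlen
        omega
      rw [splitOn_no_match (p :: ps) (by simp) suffix hni]
      simp [posOf]

-- B's per-line fold over the split pieces equals A's stepA fold over the positions
theorem lineB (pat : List Char) (numLine : Int) (line : List Char) :
    ∀ (parts : List (List Char)) (i : Nat) (occ : Nat) (res : List String),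
      (parts.dropLast.foldl
        (fun (t : Nat × Nat × List String) piece =>
          let col := t.1 + piece.length
          let total := t.2.1 + 1
          (col + pat.length, total,
            if total ≤ 10 then
              t.2.2 ++ [fmtMatch (total == 1) numLine (col : Int) line]
            else t.2.2))
        (i, occ, res)).2
      = ((posOf pat.length parts i).map
          (fun pos => ((numLine, (Int.ofNat pos, line)) : Int × Int × List Char))).foldl stepA (occ, res) := by
  intro parts
  induction parts with
  | nil => intro i occ res; simp [posOf]
  | cons a t ih =>
      intro i occ res
      cases t with
      | nil => simp [posOf]
      | cons b t' =>
          rw [List.dropLast_cons_of_ne_nil (by simp)]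
          simp only [List.foldl_cons, posOf, List.map_cons]
          rw [ih]
          simp [stepA]

-- ===== VERDICT (by name: the statement is the Claim_ definition above) =====
theorem seekText_spec : Claim_equal_seekText := by
  intro pattern data _
  unfold Spec_seekText
  cases h : pattern.toList with
  | nil => simp [seekText, seekText_alt, h]
  | cons p ps =>
      simp only [seekText, seekText_alt, h, reduceCtorEq, if_false]
      have hcong :
          (PySem.List.enumerate (PySem.Chars.splitlines data.toList) 1).foldl
            (fun s nl => lineLoopA (p :: ps) nl.2 nl.1 (nl.2.length + 1) 0 s.1 s.2) (0, [])
          = (PySem.List.enumerate (PySem.Chars.splitlines data.toList) 1).foldl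
            (fun (s : Nat × List String) nl =>
              ((PySem.Chars.splitOn nl.2 (p :: ps)).dropLast.foldl
                (fun (t : Nat × Nat × List String) piece =>
                  let col := t.1 + piece.length
                  let total := t.2.1 + 1
                  (col + (p :: ps).length, total,
                    if total ≤ 10 then
                      t.2.2 ++ [fmtMatch (total == 1) nl.1 (col : Int) nl.2]
                    else t.2.2))
                (0, s.1, s.2)).2) (0, []) := by
        apply PySem.List.foldl_congr_mem
        intro s nl _
        rw [lineA p ps nl.2 nl.1 (nl.2.length + 1) 0 s.1 s.2 (by omega) (by omega)]
        simp only [List.drop_zero]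
        rw [scanB_eq_posOf p ps nl.2 0]
        rw [lineB (p :: ps) nl.1 nl.2 (PySem.Chars.splitOn nl.2 (p :: ps)) 0 s.1 s.2]
        simp only [List.length_cons]
      rw [hcong]
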